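-- pv_equiv track=rewrite | github.com/johnmartins/py-doe-setup | matrix.py | create_factorial_matrix
-- ===== SOURCE A (Python) =====
-- from copy import copy
--
-- def create_factorial_matrix(parameters):
--     """
--     Creates a DOE matrix with all possible combinations of the parameters used with this method.
--
--     High time complexity O(k^j) where k is the amount of parameters, and j is the amount of levels for each parameter.
--     Careful with large amounts of parameters. This is not optimized for large experiments. In fact, it is not optimized
--     at all.
--
--     :param parameters: Whatever parameters you wish to vary in your experiment
--     :return: DOE Parameter matrix with all combinations. Combinations are sorted by row (one row = one combination).
--     """
--     # calculate dimension
--     num_runs = 1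
--
--     for parameter in parameters:
--         num_runs *= len(parameter)
--
--     parameter_matrix = []
--     parameter_matrix_converted = []
--
--     zeros_array = [0] * len(parameters)
--     parameter_matrix.append(zeros_array)
--
--     for i in range(1, num_runs + 1):
--         params = copy(parameter_matrix[i - 1])  # Copy last set of parameters
--
--         # Convert and insert the values from the LAST iteration into a new matrix.
--         actual_values = []
--         for j in range(0, len(params)):
--             actual_values.append(parameters[j][params[j]])
--         parameter_matrix_converted.append(actual_values)
--
--         index = 0
--         while params[index] == len(parameters[index]) - 1:
--             params[index] = 0
--             index += 1
--
--             if index >= len(params):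
--                 break
--
--         if index == len(params):
--             break
--
--         params[index] += 1
--         parameter_matrix.append(params)
--
--     return parameter_matrix_converted
-- ===== SOURCE B (Python) =====
-- def create_factorial_matrix(parameters):
--     combos = [[]]
--     for parameter in reversed(parameters):
--         combos = [[value] + combo for combo in combos for value in parameter]
--     return combos
-- ===== Notes on version B (the rewrite author's own statement) =====
-- stated objective: simpler
-- what changed: Replaces the odometer/counter state machine (mixed-radix counter matrix with an explicit carry while-loop) by incremental Cartesian-product expansion: fold over the parameters in reverse, prepending each level to every accumulated combination, so the first parameter varies fastest exactly as in A.
import Mathlib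
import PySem

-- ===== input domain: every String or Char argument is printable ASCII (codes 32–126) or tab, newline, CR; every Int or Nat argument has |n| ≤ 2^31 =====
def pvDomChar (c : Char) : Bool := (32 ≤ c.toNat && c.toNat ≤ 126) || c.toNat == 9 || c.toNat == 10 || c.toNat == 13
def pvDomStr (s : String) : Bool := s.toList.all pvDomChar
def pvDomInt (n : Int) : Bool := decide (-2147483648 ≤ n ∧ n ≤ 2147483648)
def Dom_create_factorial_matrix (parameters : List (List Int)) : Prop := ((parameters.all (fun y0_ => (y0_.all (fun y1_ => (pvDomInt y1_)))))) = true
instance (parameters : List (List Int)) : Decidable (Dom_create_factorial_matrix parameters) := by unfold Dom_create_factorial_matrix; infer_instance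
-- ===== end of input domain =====

-- B replaces A's mixed-radix odometer (counter rows + carry while-loop) by incremental
-- Cartesian-product expansion over the parameters in reverse order; same rows, same order.

-- ===== PORT A =====
-- the inner carry loop: 'while params[index] == len(parameters[index]) - 1: params[index]=0; index+=1; if index>=len(params): break'.
-- The counters in params are always nonnegative, so they are ported as Nat; the
-- comparison with len-1 is done in Int exactly as Python computes it.
def pvWhile (parameters : List (List Int)) (params : List Nat) (index : Nat) :
    List Nat × Nat :=
  if _h : index < params.length then
    if ((params.getD index 0 : Int) == ((parameters.getD index []).length : Int) - 1) then
      let params' := params.set index 0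
      let index' := index + 1
      if params.length ≤ index' then (params', index')
      else pvWhile parameters params' index'
    else (params, index)
  else (params, index)
termination_by params.length - index
decreasing_by simp_all; omega

-- 'actual_values': parameters[j][params[j]] for j in range(len(params)); indices are in range whenever reached
def pvRow (parameters : List (List Int)) (params : List Nat) : List Int :=
  (List.range params.length).map (fun j => (parameters.getD j []).getD (params.getD j 0) 0)

-- 'for i in range(1, num_runs+1)' with its two breaks; only the last counter row is ever read
def pvMain (parameters : List (List Int)) :
    Nat → List Nat → List (List Int) → List (List Int)
  | 0, _, acc => acc
  | fuel + 1, params, acc =>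
    let acc' := acc ++ [pvRow parameters params]
    let r := pvWhile parameters params 0
    if r.2 = params.length then acc'
    else pvMain parameters fuel (r.1.set r.2 (r.1.getD r.2 0 + 1)) acc'

def create_factorial_matrix (parameters : List (List Int)) : List (List Int) :=
  let num_runs := parameters.foldl (fun n p => n * p.length) 1
  pvMain parameters num_runs (List.replicate parameters.length 0) []

-- ===== PORT B =====
def create_factorial_matrix_alt (parameters : List (List Int)) : List (List Int) :=
  parameters.reverse.foldl
    (fun combos parameter => combos.flatMap (fun combo => parameter.map (fun v => v :: combo)))
    [[]]

-- ===== PRECONDITION & SPEC =====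
-- Pre_ excludes only the empty parameters list, on which the Python A raises IndexError.
def Pre_create_factorial_matrix (parameters : List (List Int)) : Prop := parameters ≠ []
instance (parameters : List (List Int)) : Decidable (Pre_create_factorial_matrix parameters) := by
  unfold Pre_create_factorial_matrix; infer_instance

def pvWitness_create_factorial_matrix : List (List Int) := [[1, 2], [3]]

def Spec_create_factorial_matrix (parameters : List (List Int)) (out : List (List Int)) : Prop := out = create_factorial_matrix_alt parameters
instance (parameters : List (List Int)) (out : List (List Int)) : Decidable (Spec_create_factorial_matrix parameters out) := by unfold Spec_create_factorial_matrix; infer_instance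

-- ===== CLAIM (what is proved, stated in full; the proofs are below) =====
def Claim_equal_create_factorial_matrix : Prop := ∀ (parameters : List (List Int)), Dom_create_factorial_matrix parameters → Pre_create_factorial_matrix parameters → Spec_create_factorial_matrix parameters (create_factorial_matrix parameters)
-- ===== LEMMAS AND PROOFS =====

-- the Cartesian product both programs enumerate (first parameter varying fastest)
def pvProd : List (List Int) → List (List Int)
  | [] => [[]]
  | p :: ps => (pvProd ps).flatMap (fun r => p.map (fun v => v :: r))

theorem alt_eq_prod (ps : List (List Int)) : create_factorial_matrix_alt ps = pvProd ps := by
  unfold create_factorial_matrix_alt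
  rw [List.foldl_reverse]
  induction ps with
  | nil => rfl
  | cons p ps ih => simp [List.foldr, pvProd, ih]

theorem pvWhile_len (parameters : List (List Int)) (params : List Nat) (index : Nat) :
    (pvWhile parameters params index).1.length = params.length := by
  unfold pvWhile
  split
  · split
    · dsimp only
      split
      · simp
      · rw [pvWhile_len]; simp
    · rfl
  · rfl
termination_by params.length - index
decreasing_by simp_all; omega

theorem pvWhile_shift (p : List Int) (ps : List (List Int)) (x : Nat) (xs : List Nat) (i : Nat) :
    pvWhile (p :: ps) (x :: xs) (i + 1)
      = ((x :: (pvWhile ps xs i).1), (pvWhile ps xs i).2 + 1) := by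
  rw [pvWhile]
  conv_rhs => rw [pvWhile]
  simp only [List.length_cons, List.getD_cons_succ, List.set_cons_succ]
  by_cases h1 : i < xs.length
  · rw [dif_pos (by omega : i + 1 < xs.length + 1), dif_pos h1]
    split
    · by_cases h2 : xs.length ≤ i + 1
      · rw [if_pos (by omega : xs.length + 1 ≤ i + 1 + 1), if_pos h2]
      · rw [if_neg (by omega : ¬ xs.length + 1 ≤ i + 1 + 1), if_neg h2]
        exact pvWhile_shift p ps x (xs.set i 0) (i+1)
    · rfl
  · rw [dif_neg (by omega : ¬ i + 1 < xs.length + 1), dif_neg h1]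
termination_by xs.length - i
decreasing_by simp_all; omega

theorem pvRow_shift (p : List Int) (ps : List (List Int)) (d : Nat) (ds : List Nat) :
    pvRow (p :: ps) (d :: ds) = (p.getD d 0) :: pvRow ps ds := by
  unfold pvRow
  simp [List.range_succ_eq_map, List.map_map, Function.comp]

theorem pvMain_acc (parameters : List (List Int)) (m : Nat) (ds : List Nat)
    (acc : List (List Int)) :
    pvMain parameters m ds acc = acc ++ pvMain parameters m ds [] := by
  induction m generalizing ds acc with
  | zero => simp [pvMain]
  | succ m ih =>
    rw [pvMain, pvMain]
    split
    · rfl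
    · rw [ih, ih (acc := [] ++ [pvRow parameters ds])]
      simp

-- one inner cycle over digits d..(|p|-1) performs exactly one step of the ps-level odometer
theorem pvWhile_carry (p : List Int) (ps : List (List Int)) (d : Nat) (ds : List Nat)
    (hd : d + 1 = p.length) :
    pvWhile (p :: ps) (d :: ds) 0
      = (0 :: (pvWhile ps ds 0).1, (pvWhile ps ds 0).2 + 1) := by
  rw [pvWhile]
  rw [dif_pos (by simp : (0:Nat) < (d :: ds).length)]
  have hc : (((d :: ds).getD 0 0 : Int) == (((p :: ps).getD 0 []).length : Int) - 1) = true := by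
    simp only [List.getD_cons_zero]
    rw [beq_iff_eq]
    omega
  rw [if_pos hc]
  dsimp only
  simp only [List.set_cons_zero, List.length_cons]
  by_cases hnil : ds.length + 1 ≤ 0 + 1
  · have hds : ds = [] := List.length_eq_zero_iff.mp (by omega)
    subst hds
    have hz : pvWhile ps [] 0 = ([], 0) := by rw [pvWhile]; rw [dif_neg (by simp)]
    rw [if_pos hnil, hz]
  · rw [if_neg hnil]
    exact pvWhile_shift p ps 0 ds 0

theorem pvWhile_stay (p : List Int) (ps : List (List Int)) (d : Nat) (ds : List Nat)
    (hd : d + 1 < p.length) :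
    pvWhile (p :: ps) (d :: ds) 0 = (d :: ds, 0) := by
  rw [pvWhile]
  rw [dif_pos (by simp : (0:Nat) < (d :: ds).length)]
  have hc : ¬ ((((d :: ds).getD 0 0 : Nat) : Int) == (((p :: ps).getD 0 []).length : Int) - 1) = true := by
    simp only [List.getD_cons_zero]
    rw [beq_iff_eq]
    omega
  rw [if_neg hc]

theorem pvCycle (p : List Int) (ps : List (List Int)) :
    ∀ (k d : Nat), d + 1 + k = p.length → ∀ (F : Nat) (ds : List Nat) (acc : List (List Int)),
    pvMain (p :: ps) (k + 1 + F) (d :: ds) acc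
      = (if (pvWhile ps ds 0).2 = ds.length then
           acc ++ (p.drop d).map (fun v => v :: pvRow ps ds)
         else
           pvMain (p :: ps) F
             (0 :: (pvWhile ps ds 0).1.set (pvWhile ps ds 0).2
                ((pvWhile ps ds 0).1.getD (pvWhile ps ds 0).2 0 + 1))
             (acc ++ (p.drop d).map (fun v => v :: pvRow ps ds))) := by
  intro k
  induction k with
  | zero =>
    intro d hd F ds acc
    have hdl : d < p.length := by omega
    have hf : 0 + 1 + F = F + 1 := by omega
    rw [hf]
    simp only [pvMain]
    rw [pvRow_shift, pvWhile_carry p ps d ds (by omega)]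
    have hdrop : p.drop d = [p.getD d 0] := by
      rw [List.drop_eq_getElem_cons hdl, List.getD_eq_getElem p 0 hdl]
      have h2 : p.drop (d + 1) = [] := List.drop_eq_nil_of_le (by omega)
      rw [h2]
    rw [hdrop]
    simp only [List.length_cons, List.map_cons, List.map_nil]
    by_cases hb : (pvWhile ps ds 0).2 = ds.length
    · rw [if_pos (by omega), if_pos hb]
    · rw [if_neg (by omega), if_neg hb]
      simp only [List.set_cons_succ, List.getD_cons_succ]
  | succ k ih =>
    intro d hd F ds acc
    have hf : (k + 1) + 1 + F = (k + 1 + F) + 1 := by omega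
    rw [hf]
    simp only [pvMain]
    rw [pvRow_shift, pvWhile_stay p ps d ds (by omega)]
    rw [if_neg (by simp)]
    simp only [List.set_cons_zero, List.getD_cons_zero]
    rw [ih (d + 1) (by omega) F ds (acc ++ [p.getD d 0 :: pvRow ps ds])]
    have hdrop : p.drop d = p.getD d 0 :: p.drop (d + 1) := by
      have hdl : d < p.length := by omega
      rw [List.drop_eq_getElem_cons hdl, List.getD_eq_getElem p 0 hdl]
    rw [hdrop, List.map_cons]
    split
    · simp
    · congr 1
      simp

theorem pvStar (p : List Int) (ps : List (List Int)) (hp : p ≠ []) :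
    ∀ (m : Nat) (ds : List Nat), ds.length = ps.length → ∀ (acc : List (List Int)),
    pvMain (p :: ps) (p.length * m) (0 :: ds) acc
      = acc ++ (pvMain ps m ds []).flatMap (fun r => p.map (fun v => v :: r)) := by
  intro m
  have h1 : 0 < p.length := by cases p with | nil => exact absurd rfl hp | cons a l => simp
  induction m with
  | zero => intro ds hds acc; simp [pvMain]
  | succ m ih =>
    intro ds hds acc
    have hf : p.length * (m + 1) = (p.length - 1) + 1 + p.length * m := by
      rw [Nat.mul_succ]; omega
    rw [hf, pvCycle p ps (p.length - 1) 0 (by omega) (p.length * m) ds acc]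
    conv_rhs => rw [pvMain]
    rw [List.drop_zero]
    by_cases hb : (pvWhile ps ds 0).2 = ds.length
    · rw [if_pos hb, if_pos hb]
      simp
    · rw [if_neg hb, if_neg hb]
      have hlen : ((pvWhile ps ds 0).1.set (pvWhile ps ds 0).2
          ((pvWhile ps ds 0).1.getD (pvWhile ps ds 0).2 0 + 1)).length = ps.length := by
        rw [List.length_set, pvWhile_len, hds]
      rw [ih _ hlen (acc ++ List.map (fun v => v :: pvRow ps ds) p)]
      rw [pvMain_acc ps m _ ([] ++ [pvRow ps ds])]
      simp

theorem foldl_mul (ps : List (List Int)) :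
    ps.foldl (fun n p => n * p.length) 1 = (ps.map List.length).prod := by
  suffices h : ∀ n, ps.foldl (fun n p => n * p.length) n = n * (ps.map List.length).prod by
    simpa using h 1
  induction ps with
  | nil => simp
  | cons p ps ih => intro n; simp [List.foldl_cons, ih, List.prod_cons]; ring

theorem A_eq_prod (ps : List (List Int)) : create_factorial_matrix ps = pvProd ps := by
  induction ps with
  | nil =>
    have hz : pvWhile [] [] 0 = ([], 0) := by rw [pvWhile]; rw [dif_neg (by simp)]
    simp [create_factorial_matrix, pvMain, pvRow, pvProd, hz]
  | cons p tail ih =>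
    by_cases hp : p = []
    · subst hp
      unfold create_factorial_matrix
      rw [foldl_mul]
      simp [pvProd, pvMain]
    · unfold create_factorial_matrix
      rw [foldl_mul]
      simp only [List.map_cons, List.prod_cons, List.length_cons, List.replicate_succ]
      rw [pvStar p tail hp ((tail.map List.length).prod) (List.replicate tail.length 0)
        (by simp) []]
      have h2 : pvMain tail ((tail.map List.length).prod) (List.replicate tail.length 0) []
          = pvProd tail := by
        unfold create_factorial_matrix at ih
        rw [foldl_mul] at ih
        exact ih
      rw [h2]
      simp [pvProd]

-- ===== VERDICT (by name: the statement is the Claim_ definition above) =====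
theorem create_factorial_matrix_spec : Claim_equal_create_factorial_matrix := by
  intro ps _ _
  unfold Spec_create_factorial_matrix
  rw [A_eq_prod, alt_eq_prod]
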